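-- pv_equiv track=rewrite | github.com/HerbertFeng/Herbert-Feng-GitHub | Competition/AIPO Preliminary Round 2025/closenumbers.py | solve
-- ===== SOURCE A (Python) =====
-- def solve(n):
--     i=0
--     if n=='':
--         return 0
--     if n=='1':
--         return 2
--     res=0
--     while i<len(n):
--         if (i==0 and n[i]=='1') or n[i]=='0' or n[i]=='9':
--             res+=1
--         else:
--             res+=2
--         i+=1
--     return res
-- ===== SOURCE B (Python) =====
-- def solve(n):
--     if n == '':
--         return 0
--     if n == '1':
--         return 2
--     return 2 * len(n) - n.count('0') - n.count('9') - (1 if n[0] == '1' else 0)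
-- ===== Notes on version B (the rewrite author's own statement) =====
-- stated objective: simpler
-- what changed: Replaces the per-character while-loop with a closed form: 2*len(n) minus the counts of the two special digits and minus 1 for a special leading digit (the empty-string and single-char guards kept as in A).
import Mathlib
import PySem

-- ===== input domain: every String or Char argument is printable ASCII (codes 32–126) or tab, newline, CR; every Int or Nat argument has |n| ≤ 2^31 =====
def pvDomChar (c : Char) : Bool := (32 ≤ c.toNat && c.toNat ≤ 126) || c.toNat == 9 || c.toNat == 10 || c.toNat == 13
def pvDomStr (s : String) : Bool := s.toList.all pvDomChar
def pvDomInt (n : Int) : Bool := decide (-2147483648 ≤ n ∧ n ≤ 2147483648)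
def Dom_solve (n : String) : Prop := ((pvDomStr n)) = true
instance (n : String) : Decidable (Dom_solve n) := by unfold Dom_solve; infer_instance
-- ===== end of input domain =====

-- B replaces A's per-character branching loop by a closed form from aggregate character counts (objective: simpler).

-- ===== PORT A =====
-- A's while-loop: index i, accumulator res, reading n[i] each step.
def solveLoop (i : Nat) (cs : List Char) (res : Int) : Int :=
  match cs with
  | [] => res
  | c :: t =>
      solveLoop (i + 1) t
        (res + (if (i == 0 && c == '1') || c == '0' || c == '9' then 1 else 2))

def solve (n : String) : Int :=
  if n = "" then 0
  else if n = "1" then 2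
  else solveLoop 0 n.toList 0

-- ===== PORT B =====
def solve_alt (n : String) : Int :=
  if n = "" then 0
  else if n = "1" then 2
  else
    2 * (PySem.Str.len n : Int) - (PySem.Str.count n "0" : Int)
      - (PySem.Str.count n "9" : Int)
      - (if PySem.Str.pyGet? n 0 = some '1' then 1 else 0)

-- ===== PRECONDITION & SPEC =====
def Spec_solve (n : String) (out : Int) : Prop := out = solve_alt n
instance (n : String) (out : Int) : Decidable (Spec_solve n out) := by unfold Spec_solve; infer_instance

-- ===== CLAIM (what is proved, stated in full; the proofs are below) =====
def Claim_equal_solve : Prop := ∀ (n : String), Dom_solve n → Spec_solve n (solve n)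

-- ===== LEMMAS AND PROOFS =====

-- single-char substring count coincides with element count
lemma chars_count_singleton (c : Char) (l : List Char) :
    PySem.Chars.count l [c] = l.count c := by
  have go : ∀ (l : List Char) (acc : Nat),
      PySem.Chars.count.go [c] l.length l acc = acc + l.count c := by
    intro l
    induction l with
    | nil => intro acc; simp [PySem.Chars.count.go]
    | cons h t ih =>
        intro acc
        simp only [List.length_cons, PySem.Chars.count.go, List.isPrefixOf,
          List.count_cons]
        by_cases hc : h = c
        · simp [hc, ih]
          omega
        · have : (c == h) = false := by simp [Ne.symm hc]
          simp [this, ih, hc]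
  simp [PySem.Chars.count, go]

lemma solveLoop_tail (t : List Char) :
    ∀ (i : Nat) (res : Int),
      solveLoop (i + 1) t res =
        res + 2 * t.length - t.count '0' - t.count '9' := by
  induction t with
  | nil => intro i res; simp [solveLoop]
  | cons c t ih =>
      intro i res
      simp only [solveLoop, Nat.add_eq_zero, one_ne_zero, and_false,
        beq_iff_eq, List.count_cons, List.length_cons]
      rw [ih]
      by_cases h0 : c = '0' <;> by_cases h9 : c = '9' <;>
        simp [h0, h9] <;> push_cast <;> ring_nf <;> omega

lemma solve_eq_alt (n : String) : solve n = solve_alt n := by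
  unfold solve solve_alt
  by_cases he : n = ""
  · simp [he]
  · by_cases h1 : n = "1"
    · simp [he, h1]
    · simp only [he, h1, if_false]
      have hne : n.toList ≠ [] := by
        intro h
        exact he (by cases n; simp_all [String.ext_iff])
      obtain ⟨c, t, hct⟩ := List.exists_cons_of_ne_nil hne
      simp only [PySem.Str.count_eq, PySem.Str.len_eq, PySem.Str.pyGet?_eq, hct,
        PySem.Chars.len_eq, PySem.Chars.pyGet?_eq_listPyGet?,
        PySem.List.pyGet?_zero_cons]
      have c0 : ("0" : String).toList = ['0'] := by decide
      have c9 : ("9" : String).toList = ['9'] := by decide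
      rw [c0, c9, chars_count_singleton, chars_count_singleton]
      show solveLoop 0 (c :: t) 0 = _
      simp only [solveLoop]
      rw [show (0 : Nat) + 1 = 0 + 1 from rfl, solveLoop_tail]
      simp only [List.count_cons, List.length_cons]
      by_cases hc1 : c = '1' <;> by_cases h0 : c = '0' <;> by_cases h9 : c = '9' <;>
        simp [hc1, h0, h9] <;> push_cast <;> ring_nf <;> omega

-- ===== VERDICT (by name: the statement is the Claim_ definition above) =====
theorem solve_spec : Claim_equal_solve := by
  intro n _
  unfold Spec_solve
  exact solve_eq_alt n
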